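-- pv_equiv track=rewrite | github.com/ElofssonLab/bioinfo-toolbox | nanjiang/misc/sortedTopoMSA2hist_numTM_io.py | IsAlternate
-- ===== SOURCE A (Python) =====
-- def IsAlternate(liStatus, numAltSerie):
--     num = len(liStatus)
--     for i in range(0, num-numAltSerie+1):
--         isAlt = True
--         for j in range(i, i+numAltSerie-1):
--             if liStatus[j] * liStatus[j+1] != -1:
--                 isAlt = False
--                 break
--         if isAlt:
--             return True
--     return False
-- ===== SOURCE B (Python) =====
-- def IsAlternate(liStatus, numAltSerie):
--     if numAltSerie <= 0:
--         return True
--     if numAltSerie == 1: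
--         return len(liStatus) >= 1
--     need = numAltSerie - 1
--     run = 0
--     for a, b in zip(liStatus, liStatus[1:]):
--         run = run + 1 if a * b == -1 else 0
--         if run >= need:
--             return True
--     return False
-- ===== Notes on version B (the rewrite author's own statement) =====
-- stated objective: alternative
-- what changed: replaces the nested window-rescan (for each start i re-check all numAltSerie-1 adjacent products) by a single pass over adjacent pairs that tracks the current run of alternating-sign adjacencies and succeeds when the run reaches numAltSerie-1; intended as faster (O(n*k) -> O(n)) but a timing run could not confirm it consistently (median 2.07x at the largest size, 2/4 inputs >= 1.5x)
import Mathlib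
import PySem

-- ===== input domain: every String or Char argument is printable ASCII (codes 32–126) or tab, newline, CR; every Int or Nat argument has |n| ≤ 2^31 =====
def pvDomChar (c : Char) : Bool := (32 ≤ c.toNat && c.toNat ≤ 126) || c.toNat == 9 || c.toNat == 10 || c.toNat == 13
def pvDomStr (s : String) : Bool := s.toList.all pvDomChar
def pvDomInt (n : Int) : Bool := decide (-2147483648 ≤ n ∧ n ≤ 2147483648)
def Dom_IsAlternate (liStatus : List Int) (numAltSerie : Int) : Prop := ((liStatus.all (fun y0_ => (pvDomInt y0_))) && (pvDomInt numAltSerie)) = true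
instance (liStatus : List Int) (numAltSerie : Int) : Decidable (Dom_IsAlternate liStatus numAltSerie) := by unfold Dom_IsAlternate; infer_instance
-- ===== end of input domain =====

-- B replaces A's nested window rescan by one pass over adjacent pairs tracking the
-- current run of alternating-sign adjacencies (objective: alternative single-pass algorithm).

-- ===== PORT A =====
-- Python's `range` is lazy, so each for-loop is ported as the count-up recursion
-- over its bounds; all indices j, j+1 are provably inside liStatus, so pyGetD is
-- exact (no IndexError).

-- inner loop `for j in range(i, i+numAltSerie-1)` with its break (isAlt)
def innerA (liStatus : List Int) (j stop : Int) : Bool :=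
  if h : j < stop then
    if PySem.List.pyGetD liStatus j 0 * PySem.List.pyGetD liStatus (j + 1) 0 != -1 then
      false
    else
      innerA liStatus (j + 1) stop
  else true
termination_by (stop - j).toNat
decreasing_by omega

-- outer loop `for i in range(0, num-numAltSerie+1)` with its early return
def outerA (liStatus : List Int) (numAltSerie : Int) (i stop : Int) : Bool :=
  if h : i < stop then
    if innerA liStatus i (i + numAltSerie - 1) then true
    else outerA liStatus numAltSerie (i + 1) stop
  else false
termination_by (stop - i).toNat
decreasing_by omega

def IsAlternate (liStatus : List Int) (numAltSerie : Int) : Bool :=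
  let num : Int := liStatus.length
  outerA liStatus numAltSerie 0 (num - numAltSerie + 1)

-- ===== PORT B =====
-- the for-loop of Source B over zip(liStatus, liStatus[1:]) with accumulator `run`
def altRun (need : Int) : List (Int × Int) → Int → Bool
  | [], _ => false
  | (a, b) :: rest, run =>
    let run' := if a * b == -1 then run + 1 else 0
    if need ≤ run' then true else altRun need rest run'

def IsAlternate_alt (liStatus : List Int) (numAltSerie : Int) : Bool :=
  if numAltSerie ≤ 0 then true
  else if numAltSerie == 1 then decide (1 ≤ liStatus.length)
  else altRun (numAltSerie - 1) (liStatus.zip (liStatus.drop 1)) 0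

-- ===== PRECONDITION & SPEC =====
def Spec_IsAlternate (liStatus : List Int) (numAltSerie : Int) (out : Bool) : Prop := out = IsAlternate_alt liStatus numAltSerie
instance (liStatus : List Int) (numAltSerie : Int) (out : Bool) : Decidable (Spec_IsAlternate liStatus numAltSerie out) := by unfold Spec_IsAlternate; infer_instance

-- ===== CLAIM (what is proved, stated in full; the proofs are below) =====
def Claim_equal_IsAlternate : Prop := ∀ (liStatus : List Int) (numAltSerie : Int), Dom_IsAlternate liStatus numAltSerie → Spec_IsAlternate liStatus numAltSerie (IsAlternate liStatus numAltSerie)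

-- ===== LEMMAS AND PROOFS =====

-- the list of booleans "adjacent pair alternates" used by both characterisations
def bsOf (xs : List Int) : List Bool :=
  (xs.zip (xs.drop 1)).map (fun ab => ab.1 * ab.2 == -1)

-- Nat version of Source B's loop, over the boolean adjacency list
def loopB (need : Nat) : List Bool → Nat → Bool
  | [], _ => false
  | b :: bs, r =>
    let r' := if b then r + 1 else 0
    if need ≤ r' then true else loopB need bs r'

lemma altRun_eq_loopB (need : Int) (hn : 1 ≤ need) :
    ∀ (P : List (Int × Int)) (r : Int), 0 ≤ r →
      altRun need P r = loopB need.toNat (P.map (fun ab => ab.1 * ab.2 == -1)) r.toNat := by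
  intro P
  induction P with
  | nil => intro r _; simp [altRun, loopB]
  | cons ab P ih =>
    intro r hr
    obtain ⟨a, b⟩ := ab
    simp only [altRun, loopB, List.map_cons]
    by_cases hq : a * b == -1
    · simp only [hq, if_true]
      have hcond : (need ≤ r + 1) ↔ (need.toNat ≤ r.toNat + 1) := by omega
      by_cases hc : need ≤ r + 1
      · rw [if_pos hc, if_pos (hcond.mp hc)]
      · rw [if_neg hc, if_neg (fun h => hc (hcond.mpr h))]
        have h1 : (r + 1).toNat = r.toNat + 1 := by omega
        rw [ih (r + 1) (by omega), h1]
    · simp only [hq, Bool.false_eq_true, if_false]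
      have h0 : ¬ need ≤ (0 : Int) := by omega
      have h0' : ¬ need.toNat ≤ 0 := by omega
      rw [if_neg h0, if_neg h0', ih 0 le_rfl]
      simp

lemma loopB_iff (need : Nat) (hn : 1 ≤ need) :
    ∀ (bs : List Bool) (r : Nat),
      (loopB need bs r = true ↔
        (∃ p, 1 ≤ p ∧ p ≤ bs.length ∧ need ≤ r + p ∧ ∀ t, t < p → bs.getD t false = true) ∨
        (∃ i, i + need ≤ bs.length ∧ ∀ t, t < need → bs.getD (i + t) false = true)) := by
  intro bs
  induction bs with
  | nil =>
    intro r
    simp only [loopB]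
    constructor
    · intro h; exact absurd h (by simp)
    · rintro (⟨p, hp1, hp2, _⟩ | ⟨i, hi, _⟩)
      · simp at hp2; omega
      · simp at hi; omega
  | cons b bs ih =>
    intro r
    simp only [List.length_cons]
    by_cases hb : b = true
    · subst hb
      simp only [loopB, if_true]
      by_cases hc : need ≤ r + 1
      · rw [if_pos hc]
        constructor
        · intro _
          left
          exact ⟨1, le_rfl, by omega, by omega, by intro t ht; interval_cases t; rfl⟩
        · intro _; rfl
      · rw [if_neg hc, ih (r + 1)]
        constructor
        · rintro (⟨p, hp1, hp2, hp3, hp4⟩ | ⟨i, hi, hall⟩)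
          · left
            refine ⟨p + 1, by omega, by omega, by omega, ?_⟩
            intro t ht
            cases t with
            | zero => rfl
            | succ t => simpa using hp4 t (by omega)
          · right
            refine ⟨i + 1, by omega, ?_⟩
            intro t ht
            have h := hall t ht
            simpa [Nat.add_right_comm] using h
        · rintro (⟨p, hp1, hp2, hp3, hp4⟩ | ⟨i, hi, hall⟩)
          · -- prefix of true :: bs; p = 1 contradicts hc, so p ≥ 2
            have hp2' : p ≥ 2 := by omega
            left
            refine ⟨p - 1, by omega, by omega, by omega, ?_⟩
            intro t ht
            have h := hp4 (t + 1) (by omega)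
            simpa using h
          · cases i with
            | zero =>
              -- the run starts at the head; use the prefix disjunct
              left
              refine ⟨need - 1, by omega, by omega, by omega, ?_⟩
              intro t ht
              have h := hall (t + 1) (by omega)
              simpa using h
            | succ i =>
              right
              refine ⟨i, by omega, ?_⟩
              intro t ht
              have h := hall t ht
              simpa [Nat.add_right_comm] using h
    · have hb' : b = false := by simpa using hb
      subst hb'
      simp only [loopB, Bool.false_eq_true, if_false]
      rw [if_neg (by omega), ih 0]
      constructor
      · rintro (⟨p, hp1, hp2, hp3, hp4⟩ | ⟨i, hi, hall⟩)
        · -- a prefix run with no credit is already an interior run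
          right
          refine ⟨0 + 1, by omega, ?_⟩
          intro t ht
          have h := hp4 t (by omega)
          simpa [Nat.add_comm] using h
        · right
          refine ⟨i + 1, by omega, ?_⟩
          intro t ht
          have h := hall t ht
          simpa [Nat.add_right_comm] using h
      · rintro (⟨p, hp1, hp2, hp3, hp4⟩ | ⟨i, hi, hall⟩)
        · exfalso
          have h := hp4 0 (by omega)
          simp at h
        · cases i with
          | zero =>
            exfalso
            have h := hall 0 (by omega)
            simp at h
          | succ i =>
            right
            refine ⟨i, by omega, ?_⟩
            intro t ht
            have h := hall t ht
            simpa [Nat.add_right_comm] using h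

-- characterisation of B's answer for numAltSerie ≥ 2
-- the count-up recursions compute exactly any/all over the corresponding ranges
lemma innerA_eq (liStatus : List Int) (j stop : Int) :
    innerA liStatus j stop =
      (PySem.List.pyRange j stop 1).all (fun t =>
        PySem.List.pyGetD liStatus t 0 * PySem.List.pyGetD liStatus (t + 1) 0 == -1) := by
  by_cases h : j < stop
  · rw [innerA, dif_pos h, PySem.List.pyRange_one_cons h, List.all_cons]
    by_cases hq : PySem.List.pyGetD liStatus j 0 * PySem.List.pyGetD liStatus (j + 1) 0 == -1
    · rw [if_neg (by simpa using hq), innerA_eq liStatus (j + 1) stop, hq, Bool.true_and]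
    · rw [if_pos (by simpa using hq)]
      simp [hq]
  · rw [innerA, dif_neg h, PySem.List.pyRange_one_eq_nil (by omega), List.all_nil]
termination_by (stop - j).toNat
decreasing_by omega

lemma outerA_eq (liStatus : List Int) (numAltSerie : Int) (i stop : Int) :
    outerA liStatus numAltSerie i stop =
      (PySem.List.pyRange i stop 1).any (fun t => innerA liStatus t (t + numAltSerie - 1)) := by
  by_cases h : i < stop
  · rw [outerA, dif_pos h, PySem.List.pyRange_one_cons h, List.any_cons]
    by_cases hin : innerA liStatus i (i + numAltSerie - 1)
    · simp [hin]
    · rw [if_neg (by simpa using hin), outerA_eq liStatus numAltSerie (i + 1) stop]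
      simp [hin]
  · rw [outerA, dif_neg h, PySem.List.pyRange_one_eq_nil (by omega), List.any_nil]
termination_by (stop - i).toNat
decreasing_by omega

lemma IsAlternate_eq_ranges (liStatus : List Int) (numAltSerie : Int) :
    IsAlternate liStatus numAltSerie =
      (PySem.List.pyRange 0 ((liStatus.length : Int) - numAltSerie + 1) 1).any (fun i =>
        (PySem.List.pyRange i (i + numAltSerie - 1) 1).all (fun j =>
          PySem.List.pyGetD liStatus j 0 * PySem.List.pyGetD liStatus (j + 1) 0 == -1)) := by
  rw [IsAlternate, outerA_eq]
  simp only [innerA_eq]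

lemma alt_iff (xs : List Int) (k : Int) (hk : 2 ≤ k) :
    (IsAlternate_alt xs k = true ↔
      ∃ i : Nat, i + (k - 1).toNat ≤ (bsOf xs).length ∧
        ∀ t, t < (k - 1).toNat → (bsOf xs).getD (i + t) false = true) := by
  have h1 : ¬ k ≤ 0 := by omega
  have h2 : ¬ (k == 1) = true := by simp; omega
  rw [IsAlternate_alt, if_neg h1, if_neg (by simpa using h2)]
  rw [altRun_eq_loopB (k - 1) (by omega) _ 0 le_rfl]
  have hbs : (xs.zip (xs.drop 1)).map (fun ab => ab.1 * ab.2 == -1) = bsOf xs := rfl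
  rw [hbs, show ((0 : Int)).toNat = 0 from rfl,
      loopB_iff (k - 1).toNat (by omega) (bsOf xs) 0]
  constructor
  · rintro (⟨p, hp1, hp2, hp3, hp4⟩ | h)
    · exact ⟨0, by omega, fun t ht => by simpa using hp4 t (by omega)⟩
    · exact h
  · exact Or.inr

-- bsOf entries in terms of xs
lemma bsOf_length (xs : List Int) : (bsOf xs).length = xs.length - 1 := by
  simp [bsOf, List.length_zip]

lemma bsOf_getD (xs : List Int) (m : Nat) (hm : m < (bsOf xs).length) :
    (bsOf xs).getD m false = (xs.getD m 0 * xs.getD (m + 1) 0 == -1) := by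
  have hlen := bsOf_length xs
  have hm1 : m < xs.length := by omega
  have hm2 : m + 1 < xs.length := by omega
  have hz : m < (xs.zip (xs.drop 1)).length := by
    simpa [bsOf] using hm
  rw [List.getD_eq_getElem _ _ hm]
  rw [List.getD_eq_getElem _ _ hm1, List.getD_eq_getElem _ _ hm2]
  simp [bsOf, List.getElem_zip]

-- characterisation of A's answer for numAltSerie ≥ 2
lemma a_iff (xs : List Int) (k : Int) (hk : 2 ≤ k) :
    (IsAlternate xs k = true ↔
      ∃ i : Nat, i + (k - 1).toNat ≤ (bsOf xs).length ∧
        ∀ t, t < (k - 1).toNat → (bsOf xs).getD (i + t) false = true) := by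
  have hlen := bsOf_length xs
  rw [IsAlternate_eq_ranges]
  simp only [List.any_eq_true, PySem.List.mem_pyRange_one]
  constructor
  · rintro ⟨i, ⟨hi0, hi1⟩, hall⟩
    simp only [List.all_eq_true, PySem.List.mem_pyRange_one] at hall
    refine ⟨i.toNat, by omega, ?_⟩
    intro t ht
    have hm : i.toNat + t < (bsOf xs).length := by omega
    rw [bsOf_getD xs _ hm]
    have hj := hall (i + t) ⟨by omega, by omega⟩
    have e1 : PySem.List.pyGetD xs (i + t) 0 = xs.getD (i.toNat + t) 0 := by
      rw [show (i + (t : Int)) = ((i.toNat + t : Nat) : Int) by omega]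
      exact PySem.List.pyGetD_natCast xs _ 0
    have e2 : PySem.List.pyGetD xs (i + t + 1) 0 = xs.getD (i.toNat + t + 1) 0 := by
      rw [show (i + (t : Int) + 1) = ((i.toNat + t + 1 : Nat) : Int) by omega]
      exact PySem.List.pyGetD_natCast xs _ 0
    rw [e1, e2] at hj
    exact hj
  · rintro ⟨i, hi, hall⟩
    refine ⟨(i : Int), ⟨by omega, by omega⟩, ?_⟩
    simp only [List.all_eq_true, PySem.List.mem_pyRange_one]
    intro j ⟨hj0, hj1⟩
    set t : Nat := (j - i).toNat with htdef
    have ht : t < (k - 1).toNat := by omega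
    have := hall t ht
    rw [bsOf_getD xs _ (by omega)] at this
    have e1 : PySem.List.pyGetD xs j 0 = xs.getD (i + t) 0 := by
      rw [show j = ((i + t : Nat) : Int) by omega]
      exact PySem.List.pyGetD_natCast xs _ 0
    have e2 : PySem.List.pyGetD xs (j + 1) 0 = xs.getD (i + t + 1) 0 := by
      rw [show j + 1 = ((i + t + 1 : Nat) : Int) by omega]
      exact PySem.List.pyGetD_natCast xs _ 0
    rw [e1, e2]
    exact this

lemma main_eq (xs : List Int) (k : Int) : IsAlternate xs k = IsAlternate_alt xs k := by
  by_cases hk0 : k ≤ 0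
  · -- both sides are true: A's outer range is nonempty and its inner range is empty
    rw [IsAlternate_alt, if_pos hk0, IsAlternate_eq_ranges]
    have hout : (0 : Int) < (xs.length : Int) - k + 1 := by omega
    rw [PySem.List.pyRange_one_cons hout]
    simp only [List.any_cons]
    rw [PySem.List.pyRange_one_eq_nil (by omega : (0 : Int) + k - 1 ≤ 0)]
    simp
  · by_cases hk1 : k = 1
    · subst hk1
      rw [IsAlternate_alt]
      rw [if_neg (by omega), if_pos (by simp)]
      rw [IsAlternate_eq_ranges]
      rw [Bool.eq_iff_iff]
      simp only [List.any_eq_true, PySem.List.mem_pyRange_one, decide_eq_true_iff]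
      constructor
      · rintro ⟨i, ⟨h0, h1⟩, _⟩; omega
      · intro h
        refine ⟨0, ⟨le_rfl, by omega⟩, ?_⟩
        rw [PySem.List.pyRange_one_eq_nil (by omega)]
        simp
    · have hk : 2 ≤ k := by omega
      rw [Bool.eq_iff_iff, a_iff xs k hk, alt_iff xs k hk]

-- ===== VERDICT (by name: the statement is the Claim_ definition above) =====
theorem IsAlternate_spec : Claim_equal_IsAlternate := by
  intro xs k _
  unfold Spec_IsAlternate
  exact main_eq xs k
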